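-- pv_equiv track=rewrite | github.com/RishabhMathur06/Data-Structures-and-Algorithms | Strings/Minimum Indexed Character.py | minIndexChar
-- ===== SOURCE A (Python) =====
-- def minIndexChar(Str, pat):
--     minm = float("inf")
--     seen = set()
--     hmap = {}
--
--     for char in Str:
--         if(char not in seen):
--             seen.add(char)
--             hmap[char] = Str.index(char)
--
--     for char in pat:
--         if(char in hmap):
--             minm = min(hmap[char], minm)
--
--     return -1 if minm==float("inf") else minm
-- ===== SOURCE B (Python) =====
-- def minIndexChar(Str, pat):
--     patset = set(pat)
--     for i, ch in enumerate(Str):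
--         if ch in patset:
--             return i
--     return -1
-- ===== Notes on version B (the rewrite author's own statement) =====
-- stated objective: faster
-- what changed: Replaced A's first-occurrence-index table over Str (which calls Str.index, rescanning Str, once per distinct character) plus a min-scan of pat by a single early-returning scan of Str against a set of pat's characters.
import Mathlib
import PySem

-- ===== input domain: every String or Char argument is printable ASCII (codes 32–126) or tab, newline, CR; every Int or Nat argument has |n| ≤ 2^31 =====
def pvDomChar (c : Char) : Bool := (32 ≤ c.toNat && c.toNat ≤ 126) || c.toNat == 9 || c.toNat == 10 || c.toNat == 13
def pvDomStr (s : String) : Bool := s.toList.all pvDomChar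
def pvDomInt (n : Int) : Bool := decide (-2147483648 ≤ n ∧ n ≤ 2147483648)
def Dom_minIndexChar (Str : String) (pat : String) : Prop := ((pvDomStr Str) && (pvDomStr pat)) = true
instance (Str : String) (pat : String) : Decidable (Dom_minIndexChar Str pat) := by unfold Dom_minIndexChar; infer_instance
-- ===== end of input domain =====

-- B replaces A's table of first-occurrence indices plus a min-scan of pat by one
-- early-returning scan of Str against a set of pat's characters (objective: simpler).

-- ===== PORT A =====
-- A-side helpers: the two loop bodies of A, verbatim.
-- float('inf') is modeled as Option Int (none = +inf);
-- Str.index(char) is ported as PySem.Str.find Str ⟨[char]⟩ — exact here, since char is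
-- always taken from Str itself, so it is present and .index agrees with .find.
def aLoop1Step (Str : String) (st : PySem.Set Char × PySem.Dict Char Int) (char : Char) :
    PySem.Set Char × PySem.Dict Char Int :=
  if PySem.Set.contains st.1 char = false then
    (PySem.Set.add st.1 char,
     PySem.Dict.insert st.2 char (PySem.Str.find Str (String.ofList [char])))
  else st

def aLoop2Step (d : PySem.Dict Char Int) (minm : Option Int) (char : Char) : Option Int :=
  match PySem.Dict.get? d char with
  | some v => some (match minm with | none => v | some m => min v m)
  | none => minm

def minIndexChar (Str : String) (pat : String) : Int :=
  let st := Str.toList.foldl (aLoop1Step Str) (PySem.Set.empty, PySem.Dict.empty)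
  let minm := pat.toList.foldl (aLoop2Step st.2) (none : Option Int)
  match minm with
  | none => -1
  | some m => m

-- ===== PORT B =====
-- B-side helper: the early-returning 'for i, ch in enumerate(Str)' loop.
def minIndexCharAltGo (patset : PySem.Set Char) : List Char → Nat → Int
  | [], _ => -1
  | ch :: rest, i =>
      if PySem.Set.contains patset ch then (i : Int)
      else minIndexCharAltGo patset rest (i + 1)

def minIndexChar_alt (Str : String) (pat : String) : Int :=
  minIndexCharAltGo (PySem.Set.ofList pat.toList) Str.toList 0

-- ===== PRECONDITION & SPEC =====
def Spec_minIndexChar (Str : String) (pat : String) (out : Int) : Prop := out = minIndexChar_alt Str pat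
instance (Str : String) (pat : String) (out : Int) : Decidable (Spec_minIndexChar Str pat out) := by unfold Spec_minIndexChar; infer_instance

-- ===== CLAIM (what is proved, stated in full; the proofs are below) =====
def Claim_equal_minIndexChar : Prop := ∀ (Str : String) (pat : String), Dom_minIndexChar Str pat → Spec_minIndexChar Str pat (minIndexChar Str pat)

-- ===== LEMMAS AND PROOFS =====

-- Proof-side model: everything in Option Nat over the character lists.
def ocast : Option Nat → Option Int
  | none => none
  | some i => some (i : Int)

def natStep (s : List Char) (m : Option Nat) (c : Char) : Option Nat :=
  match PySem.List.index? s c with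
  | some i => some (match m with | none => i | some k => min i k)
  | none => m

def NA (s P : List Char) : Option Nat := P.foldl (natStep s) none

def NB (P : List Char) : List Char → Option Nat
  | [] => none
  | c :: t => if c ∈ P then some 0 else (NB P t).map (· + 1)

-- str.find with a single-character needle is the first index of that character.
theorem find_go_singleton (c : Char) : ∀ (l : List Char) (k : Nat),
    PySem.Chars.find.go [c] l k =
      match PySem.List.index? l c with
      | none => -1
      | some i => ((k + i : Nat) : Int) := by
  intro l
  induction l with
  | nil => intro k; simp [PySem.Chars.find.go, PySem.List.index?, List.idxOf?]
  | cons h t ih =>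
      intro k
      by_cases hc : h = c
      · subst hc
        rw [PySem.List.index?_cons_self]
        simp [PySem.Chars.find.go, List.isPrefixOf]
      · rw [PySem.List.index?_cons_of_ne _ hc]
        have hpre : List.isPrefixOf [c] (h :: t) = false := by
          simp [List.isPrefixOf]
          exact fun h' => absurd h'.symm hc
        rw [PySem.Chars.find.go, hpre]
        simp only [Bool.false_eq_true, if_false]
        rw [ih (k + 1)]
        cases hidx : PySem.List.index? t c with
        | none => simp
        | some i =>
            simp only [Option.map_some]
            congr 1
            omega

theorem find_singleton (Str : String) (c : Char) :
    PySem.Str.find Str (String.ofList [c]) =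
      match PySem.List.index? Str.toList c with
      | none => -1
      | some i => (i : Int) := by
  rw [PySem.Str.find_eq]
  have h1 : (String.ofList [c]).toList = [c] := by simp
  rw [h1]
  show PySem.Chars.find.go [c] Str.toList 0 = _
  rw [find_go_singleton]
  cases PySem.List.index? Str.toList c <;> simp

-- Invariant of A's first loop: the dict maps each already-seen character to
-- Str.find of it; seen tracks exactly the dict's keys.
theorem loop1_get? (Str : String) : ∀ (l : List Char) (seen : PySem.Set Char)
    (d : PySem.Dict Char Int)
    (hinv : ∀ c, (PySem.Set.contains seen c = true) ↔ (d.get? c).isSome = true)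
    (c : Char),
    ((l.foldl (aLoop1Step Str) (seen, d)).2).get? c =
      if (d.get? c).isSome then d.get? c
      else if c ∈ l then some (PySem.Str.find Str (String.ofList [c])) else none := by
  intro l
  induction l with
  | nil =>
      intro seen d hinv c
      by_cases hs : (d.get? c).isSome = true
      · simp [hs]
      · have hn : d.get? c = none := Option.not_isSome_iff_eq_none.1 hs
        simp [hn]
  | cons a t ih =>
      intro seen d hinv c
      by_cases ha : PySem.Set.contains seen a = true
      · have ham : a ∈ seen := by simpa [PySem.Set.contains] using ha
        have hstep : aLoop1Step Str (seen, d) a = (seen, d) := by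
          simp [aLoop1Step, PySem.Set.contains, ham]
        rw [List.foldl_cons, hstep, ih seen d hinv c]
        by_cases hs : (d.get? c).isSome
        · simp [hs]
        · simp only [hs, if_false, Bool.false_eq_true]
          have hca : c ≠ a := by
            rintro rfl
            exact hs ((hinv c).1 ha)
          simp [List.mem_cons, hca]
      · have ham : a ∉ seen := by simpa [PySem.Set.contains] using ha
        have hstep : aLoop1Step Str (seen, d) a =
            (PySem.Set.add seen a,
             PySem.Dict.insert d a (PySem.Str.find Str (String.ofList [a]))) := by
          simp [aLoop1Step, PySem.Set.contains, ham]
        have hda : d.get? a = none := by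
          cases h : d.get? a with
          | none => rfl
          | some v => exact absurd ((hinv a).2 (by simp [h])) ha
        rw [List.foldl_cons, hstep]
        have hinv' : ∀ c', (PySem.Set.contains (PySem.Set.add seen a) c' = true)
            ↔ (((PySem.Dict.insert d a (PySem.Str.find Str (String.ofList [a]))).get? c').isSome = true) := by
          intro c'
          rw [PySem.Dict.get?_insert]
          by_cases hc' : c' = a
          · subst hc'
            simp [PySem.Set.contains, PySem.Set.mem_add]
          · simp only [hc', if_false]
            rw [← hinv c']
            simp [PySem.Set.contains, PySem.Set.mem_add, hc']
        rw [ih _ _ hinv' c]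
        rw [PySem.Dict.get?_insert]
        by_cases hc : c = a
        · subst hc
          simp [hda]
        · simp only [hc, if_false]
          simp [List.mem_cons, hc]

-- After the whole first loop starting empty, the dict is index? cast to Int.
theorem loop1_final (Str : String) (c : Char) :
    ((Str.toList.foldl (aLoop1Step Str) (PySem.Set.empty, PySem.Dict.empty)).2).get? c =
      ocast (PySem.List.index? Str.toList c) := by
  rw [loop1_get? Str Str.toList PySem.Set.empty PySem.Dict.empty
      (by intro c'; simp [PySem.Set.contains, PySem.Set.empty, PySem.Dict.empty, PySem.Dict.get?])]
  have hempty : (PySem.Dict.empty : PySem.Dict Char Int).get? c = none := rfl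
  rw [hempty]
  simp only [Option.isSome_none, Bool.false_eq_true, if_false]
  by_cases hm : c ∈ Str.toList
  · have hsome : (PySem.List.index? Str.toList c).isSome = true :=
      (PySem.List.index?_isSome_iff _ _).2 hm
    cases hidx : PySem.List.index? Str.toList c with
    | none => rw [hidx] at hsome; simp at hsome
    | some i =>
        rw [find_singleton, hidx]
        simp [hm, ocast]
  · have hnone : PySem.List.index? Str.toList c = none := by
      rw [PySem.List.index?_eq_none_iff]; exact hm
    rw [hnone]
    simp [hm, ocast]

-- A's second loop is the Nat-valued fold, cast to Int.
theorem loop2_eq (s : List Char) (d : PySem.Dict Char Int)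
    (hd : ∀ c, d.get? c = ocast (PySem.List.index? s c)) :
    ∀ (P : List Char) (m : Option Nat),
      P.foldl (aLoop2Step d) (ocast m) = ocast (P.foldl (natStep s) m) := by
  intro P
  induction P with
  | nil => intro m; rfl
  | cons c P ih =>
      intro m
      rw [List.foldl_cons, List.foldl_cons]
      have hstep : aLoop2Step d (ocast m) c = ocast (natStep s m c) := by
        unfold aLoop2Step natStep
        rw [hd c]
        cases PySem.List.index? s c with
        | none => cases m <;> rfl
        | some i =>
            cases m with
            | none => rfl
            | some k => simp [ocast, Nat.cast_min]
      rw [hstep, ih]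

-- natStep over the empty haystack is the identity.
theorem NA_nil (P : List Char) : ∀ m, P.foldl (natStep []) m = m := by
  induction P with
  | nil => intro m; rfl
  | cons c P ih =>
      intro m
      rw [List.foldl_cons]
      have : natStep [] m c = m := by
        unfold natStep
        rw [PySem.List.index?_eq_idxOf?]
        rfl
      rw [this, ih]

-- some 0 is absorbing for natStep.
theorem fold_keep_zero (s : List Char) : ∀ (P : List Char),
    P.foldl (natStep s) (some 0) = some 0 := by
  intro P
  induction P with
  | nil => rfl
  | cons c P ih =>
      rw [List.foldl_cons]
      have : natStep s (some 0) c = some 0 := by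
        unfold natStep
        cases PySem.List.index? s c with
        | none => rfl
        | some i => simp
      rw [this, ih]

-- If some char of P has index 0 in s, the fold reaches some 0 from anywhere.
theorem fold_hit_zero (s : List Char) (a : Char) (ha0 : PySem.List.index? s a = some 0) :
    ∀ (P : List Char) (m : Option Nat), a ∈ P → P.foldl (natStep s) m = some 0 := by
  intro P
  induction P with
  | nil => intro m h; simp at h
  | cons c P ih =>
      intro m hmem
      rw [List.foldl_cons]
      by_cases hc : c = a
      · subst hc
        have : natStep s m c = some 0 := by
          unfold natStep
          rw [ha0]
          cases m with
          | none => rfl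
          | some k => simp
        rw [this, fold_keep_zero]
      · have hP : a ∈ P := by
          rcases List.mem_cons.1 hmem with h | h
          · exact absurd h.symm hc
          · exact h
        exact ih _ hP

-- Shifting the haystack by one (head not in P) shifts the fold by one.
theorem fold_shift (a : Char) (t : List Char) :
    ∀ (P : List Char) (m : Option Nat), (∀ c ∈ P, c ≠ a) →
      P.foldl (natStep (a :: t)) (m.map (· + 1)) =
        (P.foldl (natStep t) m).map (· + 1) := by
  intro P
  induction P with
  | nil => intro m h; rfl
  | cons c P ih =>
      intro m hne
      rw [List.foldl_cons, List.foldl_cons]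
      have hca : a ≠ c := fun h => (hne c (List.mem_cons_self)) h.symm
      have hstep : natStep (a :: t) (m.map (· + 1)) c = (natStep t m c).map (· + 1) := by
        unfold natStep
        rw [PySem.List.index?_cons_of_ne _ hca]
        cases PySem.List.index? t c with
        | none => rfl
        | some i =>
            cases m with
            | none => rfl
            | some k => simp [Nat.succ_min_succ]
      rw [hstep, ih _ (fun c hc => hne c (List.mem_cons_of_mem _ hc))]

-- The two pure models agree.
theorem NA_eq_NB (P : List Char) : ∀ (s : List Char), NA s P = NB P s := by
  intro s
  induction s with
  | nil =>
      show NA [] P = NB P []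
      rw [NA, NB]
      exact NA_nil P none
  | cons a t ih =>
      show NA (a :: t) P = NB P (a :: t)
      rw [NB]
      by_cases ha : a ∈ P
      · simp only [ha, if_true]
        exact fold_hit_zero (a :: t) a (PySem.List.index?_cons_self a t) P none ha
      · simp only [ha, if_false]
        have hne : ∀ c ∈ P, c ≠ a := fun c hc h => ha (h ▸ hc)
        have hsh := fold_shift a t P none hne
        simp only [Option.map_none] at hsh
        rw [NA] at ih ⊢
        rw [hsh, ih]

-- B's port computes NB.
theorem altGo_eq (P : List Char) : ∀ (t : List Char) (i : Nat),
    minIndexCharAltGo (PySem.Set.ofList P) t i =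
      match NB P t with
      | none => -1
      | some k => ((i + k : Nat) : Int) := by
  intro t
  induction t with
  | nil => intro i; rfl
  | cons c t ih =>
      intro i
      have hcont : PySem.Set.contains (PySem.Set.ofList P) c = decide (c ∈ P) := by
        simp [PySem.Set.contains, PySem.Set.mem_ofList]
      by_cases hc : c ∈ P
      · rw [minIndexCharAltGo, hcont]
        simp [NB, hc]
      · rw [minIndexCharAltGo, hcont]
        simp only [hc, decide_false, Bool.false_eq_true, if_false]
        rw [ih (i + 1), NB]
        simp only [hc, if_false]
        cases NB P t with
        | none => rfl
        | some k =>
            simp only [Option.map_some]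
            push_cast
            ring_nf

-- ===== VERDICT (by name: the statement is the Claim_ definition above) =====
theorem minIndexChar_spec : Claim_equal_minIndexChar := by
  intro Str pat _
  unfold Spec_minIndexChar minIndexChar_alt
  show (match pat.toList.foldl
          (aLoop2Step ((Str.toList.foldl (aLoop1Step Str)
            (PySem.Set.empty, PySem.Dict.empty)).2)) (none : Option Int) with
        | none => (-1 : Int)
        | some m => m) =
      minIndexCharAltGo (PySem.Set.ofList pat.toList) Str.toList 0
  have h2 := loop2_eq Str.toList
    ((Str.toList.foldl (aLoop1Step Str) (PySem.Set.empty, PySem.Dict.empty)).2)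
    (loop1_final Str) pat.toList none
  have hocn : ocast none = none := rfl
  rw [hocn] at h2
  rw [h2, altGo_eq pat.toList Str.toList 0, ← NA_eq_NB pat.toList Str.toList]
  rw [NA]
  cases pat.toList.foldl (natStep Str.toList) none with
  | none => rfl
  | some k => simp [ocast]
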